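-- pv_equiv track=rewrite | github.com/Deverydoo/SjoniTheStockPredicter | training/src/sector_classifier.py | _normalize_sector
-- ===== SOURCE A (Python) =====
-- GICS_SECTORS = {
--     0: {"name": "Information Technology", "aliases": ["Technology", "Tech"]},
--     1: {"name": "Health Care", "aliases": ["Healthcare"]},
--     2: {"name": "Financials", "aliases": ["Financial Services", "Finance"]},
--     3: {"name": "Consumer Discretionary", "aliases": ["Consumer Cyclical"]},
--     4: {"name": "Consumer Staples", "aliases": ["Consumer Defensive"]},
--     5: {"name": "Industrials", "aliases": ["Industrial"]},
--     6: {"name": "Energy", "aliases": []},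
--     7: {"name": "Utilities", "aliases": ["Utility"]},
--     8: {"name": "Real Estate", "aliases": ["REIT"]},
--     9: {"name": "Materials", "aliases": ["Basic Materials"]},
--     10: {"name": "Communication Services", "aliases": ["Telecommunications", "Media"]},
-- }
--
-- def _normalize_sector(sector: str) -> int:
--     """Convert sector string to ID"""
--     if not sector:
--         return -1
--
--     sector_lower = sector.lower().strip()
--
--     for sector_id, info in GICS_SECTORS.items():
--         if sector_lower == info["name"].lower():
--             return sector_id
--         for alias in info["aliases"]:
--             if sector_lower == alias.lower():
--                 return sector_id
--
--     return -1
-- ===== SOURCE B (Python) =====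
-- GICS_SECTORS = {
--     0: {"name": "Information Technology", "aliases": ["Technology", "Tech"]},
--     1: {"name": "Health Care", "aliases": ["Healthcare"]},
--     2: {"name": "Financials", "aliases": ["Financial Services", "Finance"]},
--     3: {"name": "Consumer Discretionary", "aliases": ["Consumer Cyclical"]},
--     4: {"name": "Consumer Staples", "aliases": ["Consumer Defensive"]},
--     5: {"name": "Industrials", "aliases": ["Industrial"]},
--     6: {"name": "Energy", "aliases": []},
--     7: {"name": "Utilities", "aliases": ["Utility"]},
--     8: {"name": "Real Estate", "aliases": ["REIT"]},
--     9: {"name": "Materials", "aliases": ["Basic Materials"]},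
--     10: {"name": "Communication Services", "aliases": ["Telecommunications", "Media"]},
-- }
--
-- # Build once: a lexicographically sorted table of (lowercased key, sector id),
-- # then answer each query with a binary search over it (no per-query scan of
-- # the whole table, no hashing).
-- _pairs = []
-- for _sid, _info in GICS_SECTORS.items():
--     _pairs.append((_info["name"].lower(), _sid))
--     for _alias in _info["aliases"]:
--         _pairs.append((_alias.lower(), _sid))
-- _TABLE = sorted(_pairs, key=lambda kv: kv[0])
--
-- def _normalize_sector(sector: str) -> int:
--     """Convert sector string to ID"""
--     if not sector:
--         return -1
--     key = sector.lower().strip()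
--     lo, hi = 0, len(_TABLE)
--     while lo < hi:
--         m = (lo + hi) // 2
--         k, v = _TABLE[m]
--         if k < key:
--             lo = m + 1
--         elif key < k:
--             hi = m
--         else:
--             return v
--     return -1
-- ===== Notes on version B (the rewrite author's own statement) =====
-- stated objective: alternative
-- what changed: Replaced A's per-call nested linear scan over GICS_SECTORS (comparing the query against every name and alias in turn) with a one-time lexicographically sorted (key, id) table queried by an iterative binary search with lo/hi bounds.
import Mathlib
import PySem

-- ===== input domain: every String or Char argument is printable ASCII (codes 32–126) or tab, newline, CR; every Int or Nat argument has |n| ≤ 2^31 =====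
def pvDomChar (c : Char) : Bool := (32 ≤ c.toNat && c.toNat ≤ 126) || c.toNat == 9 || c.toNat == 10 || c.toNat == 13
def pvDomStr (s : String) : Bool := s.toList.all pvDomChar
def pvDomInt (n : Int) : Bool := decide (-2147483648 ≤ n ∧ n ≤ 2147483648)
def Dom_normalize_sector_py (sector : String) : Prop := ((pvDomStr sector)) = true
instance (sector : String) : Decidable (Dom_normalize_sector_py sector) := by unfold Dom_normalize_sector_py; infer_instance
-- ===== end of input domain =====

-- B replaces A's per-call nested linear scan with a one-time sorted (key, id)
-- table queried by binary search (objective: alternative algorithm).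

-- ===== PORT A =====
-- The GICS_SECTORS module constant: (id, name, aliases) in insertion order.
def pvGICS : List (Int × String × List String) := [
  (0, "Information Technology", ["Technology", "Tech"]),
  (1, "Health Care", ["Healthcare"]),
  (2, "Financials", ["Financial Services", "Finance"]),
  (3, "Consumer Discretionary", ["Consumer Cyclical"]),
  (4, "Consumer Staples", ["Consumer Defensive"]),
  (5, "Industrials", ["Industrial"]),
  (6, "Energy", []),
  (7, "Utilities", ["Utility"]),
  (8, "Real Estate", ["REIT"]),
  (9, "Materials", ["Basic Materials"]),
  (10, "Communication Services", ["Telecommunications", "Media"])]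

-- inner loop 'for alias in info["aliases"]: if sector_lower == alias.lower(): return sector_id'
def pvAliasScan (key : String) : List String → Bool
  | [] => false
  | a :: rest => if key = PySem.Str.lower a then true else pvAliasScan key rest

-- outer loop 'for sector_id, info in GICS_SECTORS.items(): …'
def pvSectorScan (key : String) : List (Int × String × List String) → Int
  | [] => -1
  | (sid, name, aliases) :: rest =>
    if key = PySem.Str.lower name then sid
    else if pvAliasScan key aliases then sid
    else pvSectorScan key rest

def normalize_sector_py (sector : String) : Int :=
  if sector = "" then -1
  else pvSectorScan (PySem.Str.strip (PySem.Str.lower sector)) pvGICS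

-- ===== PORT B =====
-- module-scope build of the (lowercased key, id) pair list, then sorted by key
def pvPairs : List (String × Int) :=
  pvGICS.foldl (fun acc row =>
    row.2.2.foldl (fun acc al => acc ++ [(PySem.Str.lower al, row.1)])
      (acc ++ [(PySem.Str.lower row.2.1, row.1)])) []

def pvTable : List (String × Int) := PySem.List.sorted pvPairs (fun kv => kv.1) false

-- Python's '<' on strings: lexicographic comparison by code point, written
-- structurally over the char lists (exact for all code points).
def pvStrLt : List Char → List Char → Bool
  | [], [] => false
  | [], _ :: _ => true
  | _ :: _, [] => false
  | c :: a, d :: b => if c < d then true else if d < c then false else pvStrLt a b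

-- the 'while lo < hi' binary-search loop; fuel (= table length at the call
-- site) only makes the loop total, each iteration shrinks hi - lo.
def pvBSearch (key : String) (l : List (String × Int)) : Nat → Nat → Nat → Int
  | 0, _, _ => -1
  | fuel + 1, lo, hi =>
    if lo < hi then
      let m := (lo + hi) / 2
      let p := (l[m]?).getD ("", -1)
      if pvStrLt p.1.toList key.toList then pvBSearch key l fuel (m + 1) hi
      else if pvStrLt key.toList p.1.toList then pvBSearch key l fuel lo m
      else p.2
    else -1

def normalize_sector_py_alt (sector : String) : Int :=
  if sector = "" then -1
  else pvBSearch (PySem.Str.strip (PySem.Str.lower sector)) pvTable pvTable.length 0 pvTable.length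

-- ===== PRECONDITION & SPEC =====
def Spec_normalize_sector_py (sector : String) (out : Int) : Prop := out = normalize_sector_py_alt sector
instance (sector : String) (out : Int) : Decidable (Spec_normalize_sector_py sector out) := by unfold Spec_normalize_sector_py; infer_instance

-- ===== CLAIM (what is proved, stated in full; the proofs are below) =====
def Claim_equal_normalize_sector_py : Prop := ∀ (sector : String), Dom_normalize_sector_py sector → Spec_normalize_sector_py sector (normalize_sector_py sector)

-- ===== LEMMAS AND PROOFS =====

-- the sorted table, evaluated once
set_option maxHeartbeats 4000000 in
theorem pvTable_eq : pvTable = [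
  ("basic materials", (9 : Int)),
  ("communication services", (10 : Int)),
  ("consumer cyclical", (3 : Int)),
  ("consumer defensive", (4 : Int)),
  ("consumer discretionary", (3 : Int)),
  ("consumer staples", (4 : Int)),
  ("energy", (6 : Int)),
  ("finance", (2 : Int)),
  ("financial services", (2 : Int)),
  ("financials", (2 : Int)),
  ("health care", (1 : Int)),
  ("healthcare", (1 : Int)),
  ("industrial", (5 : Int)),
  ("industrials", (5 : Int)),
  ("information technology", (0 : Int)),
  ("materials", (9 : Int)),
  ("media", (10 : Int)),
  ("real estate", (8 : Int)),
  ("reit", (8 : Int)),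
  ("tech", (0 : Int)),
  ("technology", (0 : Int)),
  ("telecommunications", (10 : Int)),
  ("utilities", (7 : Int)),
  ("utility", (7 : Int))] := by
  apply PySem.List.sorted_eq_of_perm_of_pairwise_lt
  · decide
  · have htrans : Trans (fun a b : String × Int => a.1 < b.1) (fun a b : String × Int => a.1 < b.1) (fun a b : String × Int => a.1 < b.1) :=
      ⟨fun h1 h2 => lt_trans h1 h2⟩
    rw [← @List.isChain_iff_pairwise _ _ _ htrans]
    simp only [List.isChain_cons_cons, List.isChain_singleton, and_true, String.lt_iff_toList_lt]
    decide

-- if neither string lexicographically precedes the other, they are equal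
theorem pvStrLt_antisymm : ∀ (a b : List Char), pvStrLt a b = false → pvStrLt b a = false → a = b
  | [], [], _, _ => rfl
  | [], _ :: _, h, _ => by simp [pvStrLt] at h
  | _ :: _, [], _, h => by simp [pvStrLt] at h
  | c :: a, d :: b, h1, h2 => by
    by_cases hcd : c < d
    · simp [pvStrLt, hcd] at h1
    · by_cases hdc : d < c
      · simp [pvStrLt, hdc] at h2
      · have : c = d := le_antisymm (not_lt.mp hdc) (not_lt.mp hcd)
        subst this
        simp only [pvStrLt, if_neg hcd] at h1 h2
        rw [pvStrLt_antisymm a b h1 h2]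

-- binary search over a table none of whose keys equals `key` returns -1,
-- whatever the fuel and bounds
theorem bsearch_miss (key : String) (l : List (String × Int))
    (h : ∀ p ∈ l, p.1 ≠ key) :
    ∀ (fuel lo hi : Nat), pvBSearch key l fuel lo hi = -1 := by
  intro fuel
  induction fuel with
  | zero => intro lo hi; rfl
  | succ n ih =>
    intro lo hi
    by_cases hlh : lo < hi
    · cases hg : l[(lo + hi) / 2]? with
      | none =>
        simp only [pvBSearch, hlh, if_true, hg, Option.getD_none]
        split_ifs with h1 h2
        · exact ih _ _
        · exact ih _ _
        · rfl
      | some p =>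
        have hne : p.1 ≠ key := h p (List.mem_of_getElem? hg)
        simp only [pvBSearch, hlh, if_true, hg, Option.getD_some]
        split_ifs with h1 h2
        · exact ih _ _
        · exact ih _ _
        · have := pvStrLt_antisymm _ _ (Bool.not_eq_true _ ▸ h1) (Bool.not_eq_true _ ▸ h2)
          exact absurd (String.toList_inj.mp this) hne
    · simp [pvBSearch, hlh]

-- Core: the nested scan of A equals the binary search of B, for every key.
set_option maxHeartbeats 4000000 in
theorem scan_eq_search (key : String) :
    pvSectorScan key pvGICS = pvBSearch key pvTable pvTable.length 0 pvTable.length := by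
  have e0 : PySem.Str.lower "Information Technology" = "information technology" := by decide
  have e1 : PySem.Str.lower "Technology" = "technology" := by decide
  have e2 : PySem.Str.lower "Tech" = "tech" := by decide
  have e3 : PySem.Str.lower "Health Care" = "health care" := by decide
  have e4 : PySem.Str.lower "Healthcare" = "healthcare" := by decide
  have e5 : PySem.Str.lower "Financials" = "financials" := by decide
  have e6 : PySem.Str.lower "Financial Services" = "financial services" := by decide
  have e7 : PySem.Str.lower "Finance" = "finance" := by decide
  have e8 : PySem.Str.lower "Consumer Discretionary" = "consumer discretionary" := by decide
  have e9 : PySem.Str.lower "Consumer Cyclical" = "consumer cyclical" := by decide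
  have e10 : PySem.Str.lower "Consumer Staples" = "consumer staples" := by decide
  have e11 : PySem.Str.lower "Consumer Defensive" = "consumer defensive" := by decide
  have e12 : PySem.Str.lower "Industrials" = "industrials" := by decide
  have e13 : PySem.Str.lower "Industrial" = "industrial" := by decide
  have e14 : PySem.Str.lower "Energy" = "energy" := by decide
  have e15 : PySem.Str.lower "Utilities" = "utilities" := by decide
  have e16 : PySem.Str.lower "Utility" = "utility" := by decide
  have e17 : PySem.Str.lower "Real Estate" = "real estate" := by decide
  have e18 : PySem.Str.lower "REIT" = "reit" := by decide
  have e19 : PySem.Str.lower "Materials" = "materials" := by decide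
  have e20 : PySem.Str.lower "Basic Materials" = "basic materials" := by decide
  have e21 : PySem.Str.lower "Communication Services" = "communication services" := by decide
  have e22 : PySem.Str.lower "Telecommunications" = "telecommunications" := by decide
  have e23 : PySem.Str.lower "Media" = "media" := by decide
  by_cases h0 : key = "information technology"
  · subst h0; rw [pvTable_eq]; decide
  by_cases h1 : key = "technology"
  · subst h1; rw [pvTable_eq]; decide
  by_cases h2 : key = "tech"
  · subst h2; rw [pvTable_eq]; decide
  by_cases h3 : key = "health care"
  · subst h3; rw [pvTable_eq]; decide
  by_cases h4 : key = "healthcare"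
  · subst h4; rw [pvTable_eq]; decide
  by_cases h5 : key = "financials"
  · subst h5; rw [pvTable_eq]; decide
  by_cases h6 : key = "financial services"
  · subst h6; rw [pvTable_eq]; decide
  by_cases h7 : key = "finance"
  · subst h7; rw [pvTable_eq]; decide
  by_cases h8 : key = "consumer discretionary"
  · subst h8; rw [pvTable_eq]; decide
  by_cases h9 : key = "consumer cyclical"
  · subst h9; rw [pvTable_eq]; decide
  by_cases h10 : key = "consumer staples"
  · subst h10; rw [pvTable_eq]; decide
  by_cases h11 : key = "consumer defensive"
  · subst h11; rw [pvTable_eq]; decide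
  by_cases h12 : key = "industrials"
  · subst h12; rw [pvTable_eq]; decide
  by_cases h13 : key = "industrial"
  · subst h13; rw [pvTable_eq]; decide
  by_cases h14 : key = "energy"
  · subst h14; rw [pvTable_eq]; decide
  by_cases h15 : key = "utilities"
  · subst h15; rw [pvTable_eq]; decide
  by_cases h16 : key = "utility"
  · subst h16; rw [pvTable_eq]; decide
  by_cases h17 : key = "real estate"
  · subst h17; rw [pvTable_eq]; decide
  by_cases h18 : key = "reit"
  · subst h18; rw [pvTable_eq]; decide
  by_cases h19 : key = "materials"
  · subst h19; rw [pvTable_eq]; decide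
  by_cases h20 : key = "basic materials"
  · subst h20; rw [pvTable_eq]; decide
  by_cases h21 : key = "communication services"
  · subst h21; rw [pvTable_eq]; decide
  by_cases h22 : key = "telecommunications"
  · subst h22; rw [pvTable_eq]; decide
  by_cases h23 : key = "media"
  · subst h23; rw [pvTable_eq]; decide
  -- no key matches: the scan falls through and the search misses
  have hA : pvSectorScan key pvGICS = -1 := by
    simp [pvGICS, pvSectorScan, pvAliasScan, e0, e1, e2, e3, e4, e5, e6, e7, e8, e9, e10, e11, e12, e13, e14, e15, e16, e17, e18, e19, e20, e21, e22, e23, h0, h1, h2, h3, h4, h5, h6, h7, h8, h9, h10, h11, h12, h13, h14, h15, h16, h17, h18, h19, h20, h21, h22, h23]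
  have hmiss : ∀ p ∈ pvTable, p.1 ≠ key := by
    intro p hp
    rw [pvTable_eq] at hp
    simp only [List.mem_cons, List.not_mem_nil, or_false] at hp
    rcases hp with rfl|rfl|rfl|rfl|rfl|rfl|rfl|rfl|rfl|rfl|rfl|rfl|rfl|rfl|rfl|rfl|rfl|rfl|rfl|rfl|rfl|rfl|rfl|rfl <;> simp_all [eq_comm]
  rw [hA, bsearch_miss key pvTable hmiss]

-- ===== VERDICT (by name: the statement is the Claim_ definition above) =====
theorem normalize_sector_py_spec : Claim_equal_normalize_sector_py := by
  intro sector _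
  unfold Spec_normalize_sector_py normalize_sector_py normalize_sector_py_alt
  by_cases h : sector = ""
  · simp [h]
  · simp [h, scan_eq_search]
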